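-- pv_equiv track=rewrite | github.com/zhang3lab/Constellation | server/manual_compare/run_hf_single_layer_manual.py | build_layer_to_device_map
-- ===== SOURCE A (Python) =====
-- def build_layer_to_device_map(
--     target_layer: int,
--     devices: list[str],
-- ) -> dict[int, str]:
--     if target_layer < 0:
--         raise ValueError(f"target_layer must be >= 0, got {target_layer}")
--     if not devices:
--         raise ValueError("devices must be non-empty")
--
--     num_layers = target_layer + 1
--     num_devices = len(devices)
--     out: dict[int, str] = {}
--
--     for layer_id in range(num_layers):
--         dev_idx = (layer_id * num_devices) // num_layers
--         out[layer_id] = str(devices[dev_idx])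
--
--     return out
-- ===== SOURCE B (Python) =====
-- def build_layer_to_device_map(
--     target_layer: int,
--     devices: list[str],
-- ) -> dict[int, str]:
--     if target_layer < 0:
--         raise ValueError(f"target_layer must be >= 0, got {target_layer}")
--     if not devices:
--         raise ValueError("devices must be non-empty")
--
--     num_layers = target_layer + 1
--     num_devices = len(devices)
--     out: dict[int, str] = {}
--
--     for d in range(num_devices):
--         start = -(-(d * num_layers) // num_devices)
--         end = -(-((d + 1) * num_layers) // num_devices)
--         for layer_id in range(start, end):
--             out[layer_id] = str(devices[d])
--
--     return out
-- ===== Notes on version B (the rewrite author's own statement) =====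
-- stated objective: alternative
-- what changed: B inverts the decomposition: instead of computing a device index per layer by floor division, it loops over devices and assigns each device its contiguous block of layers [ceil(d*L/D), ceil((d+1)*L/D)) obtained by ceiling division.
import Mathlib
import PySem

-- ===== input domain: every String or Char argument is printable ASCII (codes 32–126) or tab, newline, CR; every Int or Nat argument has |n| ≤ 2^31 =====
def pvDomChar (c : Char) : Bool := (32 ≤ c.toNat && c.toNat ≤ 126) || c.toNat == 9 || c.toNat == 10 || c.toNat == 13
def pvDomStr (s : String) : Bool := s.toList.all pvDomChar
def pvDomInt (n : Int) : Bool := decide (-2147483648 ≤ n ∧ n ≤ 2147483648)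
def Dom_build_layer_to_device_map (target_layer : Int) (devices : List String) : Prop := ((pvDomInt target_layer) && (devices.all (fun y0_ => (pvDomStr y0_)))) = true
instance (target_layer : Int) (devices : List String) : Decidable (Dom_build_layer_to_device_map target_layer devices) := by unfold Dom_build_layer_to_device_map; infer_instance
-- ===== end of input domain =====

-- B partitions the layers into contiguous per-device blocks via ceiling division (inverse
-- decomposition of A's per-layer floor division); objective: alternative, same cost.

-- ===== PORT A =====
-- per layer_id: dev_idx = (layer_id * num_devices) // num_layers; out[layer_id] = devices[dev_idx]
def build_layer_to_device_map (target_layer : Int) (devices : List String) : List (Int × String) :=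
  let num_layers : Int := target_layer + 1
  let num_devices : Int := (devices.length : Int)
  ((PySem.List.pyRange 0 num_layers 1).foldl
    (fun (out : PySem.Dict Int String) layer_id =>
      let dev_idx := PySem.Int.floordiv (layer_id * num_devices) num_layers
      out.insert layer_id (PySem.List.pyGetD devices dev_idx ""))
    PySem.Dict.empty).items

-- ===== PORT B =====
-- per device d: layers [ceil(d*L/D), ceil((d+1)*L/D)) all map to devices[d]
def build_layer_to_device_map_alt (target_layer : Int) (devices : List String) : List (Int × String) :=
  let num_layers : Int := target_layer + 1
  let num_devices : Int := (devices.length : Int)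
  ((PySem.List.pyRange 0 num_devices 1).foldl
    (fun (out : PySem.Dict Int String) d =>
      let start := -(PySem.Int.floordiv (-(d * num_layers)) num_devices)
      let stop := -(PySem.Int.floordiv (-((d + 1) * num_layers)) num_devices)
      (PySem.List.pyRange start stop 1).foldl
        (fun (o : PySem.Dict Int String) layer_id =>
          o.insert layer_id (PySem.List.pyGetD devices d ""))
        out)
    PySem.Dict.empty).items

-- ===== PRECONDITION & SPEC =====
-- A raises ValueError when target_layer < 0 or devices is empty; exactly those inputs are excluded.
def Pre_build_layer_to_device_map (target_layer : Int) (devices : List String) : Prop :=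
  0 ≤ target_layer ∧ devices ≠ []
instance (target_layer : Int) (devices : List String) : Decidable (Pre_build_layer_to_device_map target_layer devices) := by unfold Pre_build_layer_to_device_map; infer_instance

def pvWitness_build_layer_to_device_map : Int × List String := (4, ["cuda:0", "cuda:1"])

def Spec_build_layer_to_device_map (target_layer : Int) (devices : List String) (out : List (Int × String)) : Prop := out = build_layer_to_device_map_alt target_layer devices
instance (target_layer : Int) (devices : List String) (out : List (Int × String)) : Decidable (Spec_build_layer_to_device_map target_layer devices out) := by unfold Spec_build_layer_to_device_map; infer_instance

-- ===== CLAIM (what is proved, stated in full; the proofs are below) =====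
def Claim_equal_build_layer_to_device_map : Prop := ∀ (target_layer : Int) (devices : List String), Dom_build_layer_to_device_map target_layer devices → Pre_build_layer_to_device_map target_layer devices → Spec_build_layer_to_device_map target_layer devices (build_layer_to_device_map target_layer devices)

-- ===== LEMMAS AND PROOFS =====

-- ceiling division used by B
def pvCeil (a b : Int) : Int := -(PySem.Int.floordiv (-a) b)

lemma pvCeil_bracket {a b : Int} (hb : 0 < b) : (pvCeil a b - 1) * b < a ∧ a ≤ pvCeil a b * b :=
  (PySem.Int.neg_floordiv_neg_eq_iff_of_pos hb).mp rfl

-- folding insert of fresh, increasing keys appends the pairs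
lemma items_foldl_insert_range (f : Int → String) (b : Int) :
    ∀ (n : Nat) (a : Int) (acc : PySem.Dict Int String), (b - a).toNat = n →
    (∀ k, acc.contains k = true → k < a) →
    (((PySem.List.pyRange a b 1).foldl (fun o i => o.insert i (f i)) acc).items
       = acc.items ++ (PySem.List.pyRange a b 1).map (fun i => (i, f i))
     ∧ ∀ k, ((PySem.List.pyRange a b 1).foldl (fun o i => o.insert i (f i)) acc).contains k = true →
         acc.contains k = true ∨ (a ≤ k ∧ k < b)) := by
  intro n
  induction n with
  | zero =>
      intro a acc hn _
      rw [PySem.List.pyRange_one_eq_nil (by omega)]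
      exact ⟨by simp, fun k hk => Or.inl hk⟩
  | succ m ih =>
      intro a acc hn hlt
      have hab : a < b := by omega
      rw [PySem.List.pyRange_one_cons hab]
      simp only [List.foldl_cons, List.map_cons]
      have hna : acc.contains a = false := by
        cases h : acc.contains a with
        | false => rfl
        | true => exact absurd (hlt a h) (lt_irrefl a)
      have hlt' : ∀ k, (acc.insert a (f a)).contains k = true → k < a + 1 := by
        intro k hk
        rw [PySem.Dict.contains_insert] at hk
        rcases Bool.or_eq_true_iff.mp hk with h | h
        · have : k = a := by exact_mod_cast eq_of_beq h
          omega
        · exact lt_trans (hlt k h) (by omega)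
      obtain ⟨hitems, hcont⟩ := ih (a + 1) (acc.insert a (f a)) (by omega) hlt'
      constructor
      · rw [hitems, PySem.Dict.items_insert_of_not_contains _ _ hna]
        simp
      · intro k hk
        rcases hcont k hk with h | h
        · rw [PySem.Dict.contains_insert] at h
          rcases Bool.or_eq_true_iff.mp h with h | h
          · have : k = a := by exact_mod_cast eq_of_beq h
            right; omega
          · exact Or.inl h
        · right; omega

-- inside device d's block, A's floor formula gives back d
lemma floor_of_block {L D d i : Int} (hL : 0 < L) (hD : 0 < D)
    (h1 : pvCeil (d * L) D ≤ i) (h2 : i < pvCeil ((d + 1) * L) D) :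
    PySem.Int.floordiv (i * D) L = d := by
  obtain ⟨_, hlo⟩ := pvCeil_bracket (a := d * L) hD
  obtain ⟨hhi, _⟩ := pvCeil_bracket (a := (d + 1) * L) hD
  rw [PySem.Int.floordiv_eq_iff_of_pos hL]
  constructor
  · calc d * L ≤ pvCeil (d * L) D * D := hlo
      _ ≤ i * D := by exact mul_le_mul_of_nonneg_right h1 (le_of_lt hD)
  · calc i * D ≤ (pvCeil ((d + 1) * L) D - 1) * D := by
          exact mul_le_mul_of_nonneg_right (by omega) (le_of_lt hD)
      _ < (d + 1) * L := hhi

lemma pvCeil_nonneg {a b : Int} (hb : 0 < b) (ha : 0 ≤ a) : 0 ≤ pvCeil a b := by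
  obtain ⟨_, h⟩ := pvCeil_bracket (a := a) hb
  nlinarith

lemma pvCeil_mono {L D d : Int} (hD : 0 < D) (hL : 0 ≤ L) :
    pvCeil (d * L) D ≤ pvCeil ((d + 1) * L) D := by
  obtain ⟨h1, _⟩ := pvCeil_bracket (a := d * L) hD
  obtain ⟨_, h2⟩ := pvCeil_bracket (a := (d + 1) * L) hD
  nlinarith

lemma pvCeil_self {L D : Int} (hD : 0 < D) : pvCeil (D * L) D = L := by
  rw [pvCeil, PySem.Int.neg_floordiv_neg_eq_iff_of_pos hD]
  constructor <;> nlinarith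

lemma pvCeil_zero (D : Int) : pvCeil 0 D = 0 := by
  simp [pvCeil, PySem.Int.floordiv]

-- B's outer loop over the first d devices covers exactly layers [0, ceil(d*L/D))
lemma alt_outer_invariant (devices : List String) (L : Int) (hL : 0 < L)
    (hD : 0 < (devices.length : Int)) :
    ∀ (d : Nat), (d : Int) ≤ (devices.length : Int) →
    (((PySem.List.pyRange 0 (d : Int) 1).foldl
      (fun (out : PySem.Dict Int String) d' =>
        (PySem.List.pyRange (-(PySem.Int.floordiv (-(d' * L)) (devices.length : Int)))
            (-(PySem.Int.floordiv (-((d' + 1) * L)) (devices.length : Int))) 1).foldl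
          (fun o layer_id => o.insert layer_id (PySem.List.pyGetD devices d' ""))
          out)
      PySem.Dict.empty).items
        = (PySem.List.pyRange 0 (pvCeil ((d : Int) * L) (devices.length : Int)) 1).map
            (fun i => (i, PySem.List.pyGetD devices (PySem.Int.floordiv (i * (devices.length : Int)) L) ""))
     ∧ ∀ k, ((PySem.List.pyRange 0 (d : Int) 1).foldl
      (fun (out : PySem.Dict Int String) d' =>
        (PySem.List.pyRange (-(PySem.Int.floordiv (-(d' * L)) (devices.length : Int)))
            (-(PySem.Int.floordiv (-((d' + 1) * L)) (devices.length : Int))) 1).foldl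
          (fun o layer_id => o.insert layer_id (PySem.List.pyGetD devices d' ""))
          out)
      PySem.Dict.empty).contains k = true → k < pvCeil ((d : Int) * L) (devices.length : Int)) := by
  set D : Int := (devices.length : Int) with hDdef
  intro d
  induction d with
  | zero =>
      intro _
      simp only [Nat.cast_zero, zero_mul, pvCeil_zero D,
        PySem.List.pyRange_one_eq_nil (le_refl (0 : Int))]
      simp
      rfl
  | succ m ih =>
      intro hle
      obtain ⟨hitems, hcont⟩ := ih (by push_cast at hle ⊢; omega)
      rw [show ((m + 1 : Nat) : Int) = (m : Int) + 1 by push_cast; ring,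
          PySem.List.pyRange_one_succ_right (by positivity), List.foldl_append]
      simp only [List.foldl_cons, List.foldl_nil]
      set acc := ((PySem.List.pyRange 0 (m : Int) 1).foldl
        (fun (out : PySem.Dict Int String) d' =>
          (PySem.List.pyRange (-(PySem.Int.floordiv (-(d' * L)) D))
              (-(PySem.Int.floordiv (-((d' + 1) * L)) D)) 1).foldl
            (fun o layer_id => o.insert layer_id (PySem.List.pyGetD devices d' ""))
            out)
        PySem.Dict.empty) with hacc
      have hmono := pvCeil_mono (d := (m : Int)) (L := L) hD (le_of_lt hL)
      obtain ⟨hI, hC⟩ := items_foldl_insert_range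
        (fun _ => PySem.List.pyGetD devices (m : Int) "")
        (pvCeil (((m : Int) + 1) * L) D)
        ((pvCeil (((m : Int) + 1) * L) D) - pvCeil ((m : Int) * L) D).toNat
        (pvCeil ((m : Int) * L) D) acc rfl hcont
      refine ⟨?_, ?_⟩
      · show _ = _
        rw [show (-(PySem.Int.floordiv (-((m : Int) * L)) D)) = pvCeil ((m : Int) * L) D from rfl,
            show (-(PySem.Int.floordiv (-(((m : Int) + 1) * L)) D)) = pvCeil (((m : Int) + 1) * L) D from rfl]
        rw [hI, hitems]
        have hsplit := PySem.List.pyRange_one_append 0 (pvCeil ((m : Int) * L) D)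
          (pvCeil (((m : Int) + 1) * L) D)
          (pvCeil_nonneg hD (by positivity)) hmono
        rw [hsplit, List.map_append]
        congr 1
        apply List.map_congr_left
        intro i hi
        rw [PySem.List.mem_pyRange_one] at hi
        rw [floor_of_block hL hD hi.1 hi.2]
      · intro k hk
        rw [show (-(PySem.Int.floordiv (-((m : Int) * L)) D)) = pvCeil ((m : Int) * L) D from rfl,
            show (-(PySem.Int.floordiv (-(((m : Int) + 1) * L)) D)) = pvCeil (((m : Int) + 1) * L) D from rfl] at hk
        rcases hC k hk with h | h
        · exact lt_of_lt_of_le (hcont k h) hmono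
        · exact h.2

-- ===== VERDICT (by name: the statement is the Claim_ definition above) =====
theorem build_layer_to_device_map_spec : Claim_equal_build_layer_to_device_map := by
  intro target_layer devices _ hpre
  obtain ⟨ht, hne⟩ := hpre
  have hL : 0 < target_layer + 1 := by omega
  have hD : 0 < (devices.length : Int) := by
    have : devices.length ≠ 0 := fun h => hne (List.eq_nil_of_length_eq_zero h)
    omega
  show build_layer_to_device_map target_layer devices = build_layer_to_device_map_alt target_layer devices
  unfold build_layer_to_device_map build_layer_to_device_map_alt
  simp only []
  -- A's side: fresh increasing keys, so items = the mapped range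
  obtain ⟨hA, _⟩ := items_foldl_insert_range
    (fun i => PySem.List.pyGetD devices (PySem.Int.floordiv (i * (devices.length : Int)) (target_layer + 1)) "")
    (target_layer + 1) (target_layer + 1 - 0).toNat 0 PySem.Dict.empty rfl
    (by intro k hk; rw [PySem.Dict.contains_empty] at hk; exact absurd hk (by simp))
  rw [hA]
  -- B's side: the outer invariant at d = num_devices
  obtain ⟨hB, _⟩ := alt_outer_invariant devices (target_layer + 1) hL hD devices.length (le_refl _)
  rw [hB]
  rw [show ((devices.length : Int) * (target_layer + 1)) = ((devices.length : Int)) * (target_layer + 1) from rfl,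
      pvCeil_self hD]
  simp
  rfl
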